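-- pv_equiv track=rewrite | github.com/iamwatchdogs/CTAT_EIS_TEST | CTAT_EIS_TEST_2/Double_First.py | DFirst_unequalsecond
-- ===== SOURCE A (Python) =====
-- def DFirst_unequalsecond(lst):
--   i = 0
--   while i < len(lst) - 1:
--     if lst[i] == lst[i+1]:
--       lst[i] *= 2
--       del lst[i+1]
--       i = max(i-1, 0)
--     else:
--       i += 1
--   return lst
-- ===== SOURCE B (Python) =====
-- def DFirst_unequalsecond(lst):
--     stack = []
--     for x in lst:
--         while stack and stack[-1] == x:
--             x = 2 * stack.pop()
--         stack.append(x)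
--     return stack
-- ===== Notes on version B (the rewrite author's own statement) =====
-- stated objective: faster
-- what changed: Replaced A's in-place index loop that deletes/doubles and backtracks (quadratic due to repeated del and re-scans) by a single left-to-right pass maintaining a stack, merging the incoming value with the stack top while equal.
import Mathlib
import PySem

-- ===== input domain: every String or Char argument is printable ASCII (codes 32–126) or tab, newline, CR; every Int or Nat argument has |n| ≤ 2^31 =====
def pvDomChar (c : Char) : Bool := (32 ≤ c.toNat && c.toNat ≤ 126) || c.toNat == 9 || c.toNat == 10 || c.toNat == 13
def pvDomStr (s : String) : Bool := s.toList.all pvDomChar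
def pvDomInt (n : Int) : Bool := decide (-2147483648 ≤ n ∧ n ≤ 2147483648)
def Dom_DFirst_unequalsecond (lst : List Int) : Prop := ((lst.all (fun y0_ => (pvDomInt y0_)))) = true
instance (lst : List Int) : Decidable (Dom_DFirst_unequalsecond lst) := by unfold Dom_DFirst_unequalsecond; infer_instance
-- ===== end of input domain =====

-- B replaces A's backtracking index loop by a single left-to-right pass with a stack
-- (merge/double while the stack top equals the incoming value).  Note: A mutates its
-- argument in place (the equivalence proved here is about the return value only);
-- B builds a fresh list.

-- ===== PORT A =====
-- A's while loop: index i over the (shrinking) list; on equal neighbours double lst[i],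
-- delete lst[i+1] and back up to max(i-1,0) (Nat subtraction), else advance.  The loop is
-- totalized with a fuel counter; fuel 2*len(lst) exceeds the loop's step bound (the measure
-- 2*rest + stack strictly decreases, see aLoopF_eq), so the fuel never runs out.
def aLoopF (fuel : Nat) (lst : List Int) (i : Nat) : List Int :=
  match fuel with
  | 0 => lst
  | fuel + 1 =>
    if h : i + 1 < lst.length then
      if lst[i] = lst[i + 1] then
        aLoopF fuel ((lst.set i (2 * lst[i])).eraseIdx (i + 1)) (i - 1)
      else
        aLoopF fuel lst (i + 1)
    else
      lst

def DFirst_unequalsecond (lst : List Int) : List Int := aLoopF (2 * lst.length) lst 0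

-- ===== PORT B =====
-- B's inner while loop: merge the incoming value with the stack top while they are equal.
def bPush (stack : List Int) (x : Int) : List Int :=
  match stack with
  | [] => [x]
  | t :: rest => if t = x then bPush rest (2 * t) else x :: t :: rest

-- B's for loop over lst; the stack is kept top-first and reversed at the end
-- (Python appends at the back of the stack).
def DFirst_unequalsecond_alt (lst : List Int) : List Int :=
  (lst.foldl bPush []).reverse

-- ===== PRECONDITION & SPEC =====
def Spec_DFirst_unequalsecond (lst : List Int) (out : List Int) : Prop := out = DFirst_unequalsecond_alt lst
instance (lst : List Int) (out : List Int) : Decidable (Spec_DFirst_unequalsecond lst out) := by unfold Spec_DFirst_unequalsecond; infer_instance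

-- ===== CLAIM (what is proved, stated in full; the proofs are below) =====
def Claim_equal_DFirst_unequalsecond : Prop := ∀ (lst : List Int), Dom_DFirst_unequalsecond lst → Spec_DFirst_unequalsecond lst (DFirst_unequalsecond lst)

-- ===== LEMMAS AND PROOFS =====

-- Index/surgery facts about a list split as p ++ (elements from position p.length on);
-- stated with a flexible index i so they rewrite at index s.length when p = s.reverse.
theorem get_at_len (p : List Int) (t : Int) (r : List Int) (i : Nat) (hi : i = p.length)
    (h : i < (p ++ t :: r).length) : (p ++ t :: r)[i] = t := by
  subst hi
  induction p with
  | nil => rfl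
  | cons a p ih => simp only [List.cons_append, List.length_cons, List.getElem_cons_succ]; exact ih (by simp only [List.length_append, List.length_cons] at h ⊢; omega)

theorem get_at_len1 (p : List Int) (t a : Int) (r : List Int) (i : Nat) (hi : i = p.length + 1)
    (h : i < (p ++ t :: a :: r).length) : (p ++ t :: a :: r)[i] = a := by
  subst hi
  induction p with
  | nil => rfl
  | cons b p ih => simp only [List.cons_append, List.length_cons, List.getElem_cons_succ]; exact ih (by simp only [List.length_append, List.length_cons] at h ⊢; omega)

theorem set_at_len (p : List Int) (t v : Int) (r : List Int) (i : Nat) (hi : i = p.length) :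
    (p ++ t :: r).set i v = p ++ v :: r := by
  subst hi
  induction p with
  | nil => rfl
  | cons a p ih => simp [ih]

theorem erase_at_len1 (p : List Int) (a b : Int) (r : List Int) (i : Nat) (hi : i = p.length + 1) :
    (p ++ a :: b :: r).eraseIdx i = p ++ a :: r := by
  subst hi
  induction p with
  | nil => rfl
  | cons c p ih => simp [ih]

-- The heart of the proof: A's loop state is exactly a stack (the already-processed prefix,
-- top-first) followed by the unprocessed rest, one A-step simulates one bPush step, and
-- 2*|rest| + |stack| bounds the remaining number of steps (so the fuel suffices).
theorem aLoopF_eq : ∀ (fuel : Nat) (rest s : List Int) (top : Int),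
    2 * rest.length + s.length < fuel →
    aLoopF fuel (s.reverse ++ top :: rest) s.length = (List.foldl bPush (top :: s) rest).reverse := by
  intro fuel
  induction fuel with
  | zero => intro rest s top hf; omega
  | succ fuel ih =>
    intro rest s top hf
    cases rest with
    | nil =>
      simp [aLoopF]
    | cons r rest' =>
      have hlen : s.length + 1 < (s.reverse ++ top :: r :: rest').length := by simp
      rw [aLoopF, dif_pos hlen,
        get_at_len s.reverse top (r :: rest') s.length (by simp),
        get_at_len1 s.reverse top r rest' (s.length + 1) (by simp)]
      by_cases hteq : top = r
      · rw [if_pos hteq,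
          set_at_len s.reverse top (2 * top) (r :: rest') s.length (by simp),
          erase_at_len1 s.reverse (2 * top) r rest' (s.length + 1) (by simp)]
        cases s with
        | nil =>
          have := ih rest' [] (2 * top) (by simp at hf ⊢; omega)
          simpa [bPush, hteq] using this
        | cons t' s' =>
          have := ih ((2 * top) :: rest') s' t' (by simp at hf ⊢; omega)
          simp only [List.reverse_cons, List.append_assoc, List.cons_append, List.nil_append] at this ⊢
          simp only [List.length_cons, Nat.add_sub_cancel]
          rw [this]
          simp [List.foldl, bPush, hteq]
      · rw [if_neg hteq]
        have := ih rest' (top :: s) r (by simp at hf ⊢; omega)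
        simp only [List.reverse_cons, List.append_assoc, List.cons_append, List.nil_append,
          List.length_cons] at this
        rw [this]
        simp [List.foldl, bPush, hteq]

-- ===== VERDICT (by name: the statement is the Claim_ definition above) =====
theorem DFirst_unequalsecond_spec : Claim_equal_DFirst_unequalsecond := by
  intro lst _
  show DFirst_unequalsecond lst = DFirst_unequalsecond_alt lst
  cases lst with
  | nil => rfl
  | cons x xs =>
    have := aLoopF_eq (2 * (x :: xs).length) xs [] x (by simp)
    simpa [DFirst_unequalsecond, DFirst_unequalsecond_alt, bPush] using this
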